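-- pv_equiv track=rewrite | github.com/pavitra108/learning | pythonlearn/CourseQuiz.py | is_efficient
-- ===== SOURCE A (Python) =====
-- def is_efficient(letters):
--     eff_letters = set('BCDGIJLMNOPSUVWZ')
--     for let in letters:
--         if let in eff_letters:
--             pass
--         else:
--             return False
--     return True
-- ===== SOURCE B (Python) =====
-- def is_efficient(letters):
--     # bitset algorithm: fold every character code into one integer bitmask,
--     # then a single mask comparison decides the answer (no per-character
--     # membership test, no early return)
--     eff_mask = 0
--     for c in 'BCDGIJLMNOPSUVWZ':
--         eff_mask |= 1 << ord(c)
--     mask = 0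
--     for c in letters:
--         mask |= 1 << ord(c)
--     return mask | eff_mask == eff_mask
-- ===== Notes on version B (the rewrite author's own statement) =====
-- stated objective: alternative
-- what changed: Replaces the per-character set-membership loop with early return by a bitset algorithm: fold all character codes into one integer bitmask and decide with a single mask comparison against the precomputed efficient-letter mask.
import Mathlib
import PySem

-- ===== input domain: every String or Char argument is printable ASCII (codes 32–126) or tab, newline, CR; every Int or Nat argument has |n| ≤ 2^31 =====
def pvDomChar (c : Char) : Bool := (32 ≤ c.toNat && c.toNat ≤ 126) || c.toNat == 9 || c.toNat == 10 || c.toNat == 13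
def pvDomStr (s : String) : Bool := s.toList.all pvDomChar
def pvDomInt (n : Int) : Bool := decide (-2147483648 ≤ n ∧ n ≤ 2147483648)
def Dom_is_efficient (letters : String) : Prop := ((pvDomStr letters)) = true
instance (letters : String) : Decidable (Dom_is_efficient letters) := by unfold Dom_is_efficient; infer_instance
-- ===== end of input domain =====

-- B replaces A's per-character set-membership loop (early return) by a bitset algorithm:
-- fold all character codes into one integer bitmask, one mask comparison at the end (alternative).

-- ===== PORT A =====
-- eff_letters = set('BCDGIJLMNOPSUVWZ')
def effLetters : PySem.Set Char := PySem.Set.ofList "BCDGIJLMNOPSUVWZ".toList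

-- the for-loop with early 'return False', as structural recursion over the characters
def isEffLoop : List Char → Bool
  | [] => true
  | c :: rest => if PySem.Set.contains effLetters c then isEffLoop rest else false

def is_efficient (letters : String) : Bool := isEffLoop letters.toList

-- ===== PORT B =====
-- eff_mask |= 1 << ord(c) over the fixed string
def effMask : Nat := "BCDGIJLMNOPSUVWZ".toList.foldl (fun m c => m ||| (1 <<< c.toNat)) 0

-- mask |= 1 << ord(c) over the input, then one comparison
def is_efficient_alt (letters : String) : Bool :=
  decide ((letters.toList.foldl (fun m c => m ||| (1 <<< c.toNat)) 0) ||| effMask = effMask)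

-- ===== PRECONDITION & SPEC =====
def Spec_is_efficient (letters : String) (out : Bool) : Prop := out = is_efficient_alt letters
instance (letters : String) (out : Bool) : Decidable (Spec_is_efficient letters out) := by unfold Spec_is_efficient; infer_instance

-- ===== CLAIM (what is proved, stated in full; the proofs are below) =====
def Claim_equal_is_efficient : Prop := ∀ (letters : String), Dom_is_efficient letters → Spec_is_efficient letters (is_efficient letters)

-- ===== LEMMAS AND PROOFS =====

-- x ||| e = e  ↔  every bit of x is a bit of e
theorem or_eq_right_iff (x e : Nat) :
    x ||| e = e ↔ ∀ i, x.testBit i = true → e.testBit i = true := by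
  constructor
  · intro h i hi
    have := congrArg (fun n => n.testBit i) h
    simpa [Nat.testBit_or, hi] using this
  · intro h
    apply Nat.eq_of_testBit_eq
    intro i
    by_cases hx : x.testBit i
    · simp [Nat.testBit_or, hx, h i hx]
    · simp [Nat.testBit_or, hx]

theorem or_or_eq_right (a b e : Nat) :
    (a ||| b) ||| e = e ↔ (a ||| e = e ∧ b ||| e = e) := by
  simp only [or_eq_right_iff, Nat.testBit_or, Bool.or_eq_true]
  constructor
  · intro h
    exact ⟨fun i hi => h i (Or.inl hi), fun i hi => h i (Or.inr hi)⟩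
  · rintro ⟨ha, hb⟩ i (hi | hi)
    · exact ha i hi
    · exact hb i hi

-- the fold's accumulated mask is absorbed by e iff m is and every element's bit is
theorem foldl_mask_eq (cs : List Char) (e : Nat) : ∀ m : Nat,
    (List.foldl (fun m c => m ||| (1 <<< c.toNat)) m cs ||| e = e
      ↔ (m ||| e = e ∧ ∀ c ∈ cs, e.testBit c.toNat = true)) := by
  induction cs with
  | nil => intro m; simp
  | cons c rest ih =>
    intro m
    simp only [List.foldl_cons, ih, or_or_eq_right, List.mem_cons]
    have hbit : ((1 <<< c.toNat) ||| e = e) ↔ e.testBit c.toNat = true := by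
      rw [or_eq_right_iff]
      constructor
      · intro h
        exact h c.toNat (by simp [Nat.one_shiftLeft])
      · intro he i hi
        have : i = c.toNat := by
          by_contra hne
          simp [Nat.one_shiftLeft, Nat.testBit_two_pow] at hi
          omega
        simpa [this] using he
    constructor
    · rintro ⟨⟨hm, hc⟩, hrest⟩
      exact ⟨hm, fun d hd => by
        rcases hd with rfl | hd
        · exact hbit.mp hc
        · exact hrest d hd⟩
    · rintro ⟨hm, hall⟩
      exact ⟨⟨hm, hbit.mpr (hall c (Or.inl rfl))⟩, fun d hd => hall d (Or.inr hd)⟩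

-- a character equals a literal iff its code does
theorem char_eq_iff_toNat (c d : Char) : c = d ↔ c.toNat = d.toNat := by
  constructor
  · intro h; rw [h]
  · intro h; exact Char.ext (UInt32.toNat_inj.mp h)

-- for a domain character, the mask bit test agrees with set membership
theorem char_bit_eq_contains (c : Char) (h : pvDomChar c = true) :
    effMask.testBit c.toNat = PySem.Set.contains effLetters c := by
  have hn : c.toNat ≤ 126 := by
    simp only [pvDomChar, Bool.or_eq_true, Bool.and_eq_true, beq_iff_eq,
      decide_eq_true_eq] at h
    omega
  have hlist : "BCDGIJLMNOPSUVWZ".toList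
      = (['B','C','D','G','I','J','L','M','N','O','P','S','U','V','W','Z'] : List Char) := by
    decide
  have hmem : PySem.Set.contains effLetters c
      = decide (c.toNat = 66 ∨ c.toNat = 67 ∨ c.toNat = 68 ∨ c.toNat = 71 ∨
          c.toNat = 73 ∨ c.toNat = 74 ∨ c.toNat = 76 ∨ c.toNat = 77 ∨
          c.toNat = 78 ∨ c.toNat = 79 ∨ c.toNat = 80 ∨ c.toNat = 83 ∨
          c.toNat = 85 ∨ c.toNat = 86 ∨ c.toNat = 87 ∨ c.toNat = 90) := by
    have h1 : PySem.Set.contains effLetters c = decide (c ∈ "BCDGIJLMNOPSUVWZ".toList) := by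
      simp [effLetters, PySem.Set.mem_ofList]
    rw [h1, hlist]
    simp only [List.mem_cons, List.not_mem_nil, or_false, char_eq_iff_toNat]
    rfl
  rw [hmem]
  generalize c.toNat = n at hn ⊢
  interval_cases n <;> decide

-- A's loop accepts a domain string iff every character's bit lies in effMask
theorem loop_iff : ∀ cs : List Char, (∀ c ∈ cs, pvDomChar c = true) →
    ((isEffLoop cs = true) ↔ ∀ c ∈ cs, effMask.testBit c.toNat = true) := by
  intro cs
  induction cs with
  | nil => intro _; simp [isEffLoop]
  | cons c rest ih =>
    intro hdom
    have hc := char_bit_eq_contains c (hdom c (List.mem_cons_self ..))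
    have ih' := ih (fun d hd => hdom d (List.mem_cons_of_mem _ hd))
    by_cases hcon : PySem.Set.contains effLetters c
    · simp [isEffLoop, ih', hc]
    · simp only [Bool.not_eq_true] at hcon
      have hcon' : c ∉ effLetters := by simpa using hcon
      simp [isEffLoop, hc, hcon']

-- ===== VERDICT (by name: the statement is the Claim_ definition above) =====
theorem is_efficient_spec : Claim_equal_is_efficient := by
  intro letters hdom
  unfold Spec_is_efficient is_efficient is_efficient_alt
  have hdom' : ∀ c ∈ letters.toList, pvDomChar c = true := by
    simpa [Dom_is_efficient, pvDomStr, List.all_eq_true] using hdom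
  rw [Bool.eq_iff_iff, decide_eq_true_iff, foldl_mask_eq]
  simp only [Nat.zero_or, true_and]
  exact loop_iff letters.toList hdom'
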